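-- pv_equiv track=rewrite | github.com/pytorch/pytorch | pytorch-env/lib/python3.12/site-packages/hypothesis/internal/compat.py | extract_bits
-- ===== SOURCE A (Python) =====
-- from typing import Any, ForwardRef, Optional, TypedDict as TypedDict, get_args
--
-- def extract_bits(x: int, /, width: Optional[int] = None) -> list[int]:
--     assert x >= 0
--     result = []
--     while x:
--         result.append(x & 1)
--         x >>= 1
--     if width is not None:
--         result = (result + [0] * width)[:width]
--     result.reverse()
--     return result
-- ===== SOURCE B (Python) =====
-- def extract_bits(x, /, width=None):
--     assert x >= 0
--     n = x.bit_length() if width is None else width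
--     return [(x >> i) & 1 for i in range(n - 1, -1, -1)]
-- ===== Notes on version B (the rewrite author's own statement) =====
-- stated objective: simpler
-- what changed: Replaces A's accumulate-LSB-bits-then-pad/slice-then-reverse loop by computing the output length n (bit_length, or the given width) and emitting the MSB-first bits directly with indexed shifts over range(n-1,-1,-1).
-- intended difference: For a negative width with x >= 2**(-width), A returns the bit list with its last -width bits sliced off (an accident of its pad-then-[:width] step), while B returns [], the natural meaning of a non-positive bit width; negative widths are outside the function's purpose. — e.g. on extract_bits(13, some (-1)): A returns [1, 0, 1], B returns []
import Mathlib
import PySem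

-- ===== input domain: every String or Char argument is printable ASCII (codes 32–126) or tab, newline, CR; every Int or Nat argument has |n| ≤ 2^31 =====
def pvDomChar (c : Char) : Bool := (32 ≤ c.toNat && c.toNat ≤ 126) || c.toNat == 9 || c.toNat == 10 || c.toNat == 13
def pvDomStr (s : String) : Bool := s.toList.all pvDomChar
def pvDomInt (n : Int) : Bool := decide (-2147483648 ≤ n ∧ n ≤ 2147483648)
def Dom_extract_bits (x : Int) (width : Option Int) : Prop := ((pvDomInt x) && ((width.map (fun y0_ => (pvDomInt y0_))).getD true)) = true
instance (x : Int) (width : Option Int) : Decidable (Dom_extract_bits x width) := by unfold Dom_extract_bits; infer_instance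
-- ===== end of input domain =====

-- B computes the output length n up front (bit_length, or the given width) and emits the
-- MSB-first bits directly via indexed shifts, instead of A's accumulate-LSB-then-pad/slice-
-- then-reverse loop (simpler); on negative widths B returns [] where A returns a sliced list.

-- ===== PORT A =====
-- 'while x: result.append(x & 1); x >>= 1' — under the assert x ≥ 0, so the loop runs on x.toNat
def ebLoop (n : Nat) : List Int :=
  if n = 0 then [] else ((n % 2 : Nat) : Int) :: ebLoop (n / 2)
decreasing_by exact Nat.div_lt_self (Nat.pos_of_ne_zero (by assumption)) (by omega)

def extract_bits (x : Int) (width : Option Int) : List Int :=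
  -- assert x >= 0 : Pre_extract_bits excludes x < 0 (AssertionError)
  let result := ebLoop x.toNat
  let result := match width with
    | none => result
    | some w => PySem.List.slice (result ++ List.replicate w.toNat (0 : Int)) none (some w)
  result.reverse

-- ===== PORT B =====
def extract_bits_alt (x : Int) (width : Option Int) : List Int :=
  -- assert x >= 0 : Pre_extract_bits excludes x < 0
  let n : Int := match width with
    | none => (PySem.Int.bitLength x : Int)
    | some w => w
  (PySem.List.pyRange (n - 1) (-1) (-1)).map (fun i => PySem.Int.band (x >>> i.toNat) 1)

-- ===== PRECONDITION & SPEC =====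
-- A raises AssertionError exactly when x < 0
def Pre_extract_bits (x : Int) (width : Option Int) : Prop := 0 ≤ x
instance (x : Int) (width : Option Int) : Decidable (Pre_extract_bits x width) := by unfold Pre_extract_bits; infer_instance
def pvWitness_extract_bits : Int × Option Int := (13, some 3)

-- For a negative width with x >= 2**(-width), A returns the bit list with its last -width bits
-- sliced off (an accident of its pad-then-[:width] step), while B returns [], the natural meaning
-- of a non-positive bit width; negative widths are outside the function's purpose.
def D_extract_bits (x : Int) (width : Option Int) : Prop :=
  (width.any (fun w => decide (w < 0) && decide ((2 : Int) ^ (-w).toNat ≤ x))) = true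
instance (x : Int) (width : Option Int) : Decidable (D_extract_bits x width) := by unfold D_extract_bits; infer_instance

def Spec_extract_bits (x : Int) (width : Option Int) (out : List Int) : Prop :=
  ¬ D_extract_bits x width → out = extract_bits_alt x width
instance (x : Int) (width : Option Int) (out : List Int) : Decidable (Spec_extract_bits x width out) := by unfold Spec_extract_bits; infer_instance

def pvDiffWitness_extract_bits : Int × Option Int := (13, some (-1))
def pvDiffWitnessOut_extract_bits : (List Int) × (List Int) := ([1, 0, 1], [])

-- ===== CLAIM (what is proved, stated in full; the proofs are below) =====
def Claim_unchanged_extract_bits : Prop := ∀ (x : Int) (width : Option Int), Dom_extract_bits x width → Pre_extract_bits x width → Spec_extract_bits x width (extract_bits x width)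
def Claim_changed_extract_bits : Prop := Dom_extract_bits (pvDiffWitness_extract_bits.1) (pvDiffWitness_extract_bits.2) ∧ Pre_extract_bits (pvDiffWitness_extract_bits.1) (pvDiffWitness_extract_bits.2) ∧ D_extract_bits (pvDiffWitness_extract_bits.1) (pvDiffWitness_extract_bits.2) ∧ extract_bits (pvDiffWitness_extract_bits.1) (pvDiffWitness_extract_bits.2) = pvDiffWitnessOut_extract_bits.1 ∧ extract_bits_alt (pvDiffWitness_extract_bits.1) (pvDiffWitness_extract_bits.2) = pvDiffWitnessOut_extract_bits.2 ∧ pvDiffWitnessOut_extract_bits.1 ≠ pvDiffWitnessOut_extract_bits.2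
def Claim_exact_extract_bits : Prop := ∀ (x : Int) (width : Option Int), Dom_extract_bits x width → Pre_extract_bits x width → D_extract_bits x width → extract_bits x width ≠ extract_bits_alt x width

-- ===== LEMMAS AND PROOFS =====

-- one bit of m, as A produces it
def pvBit (m k : Nat) : Int := ((m >>> k) % 2 : Nat)

theorem pvBit_succ (m k : Nat) : pvBit (m / 2) k = pvBit m (k + 1) := by
  unfold pvBit
  rw [Nat.shiftRight_eq_div_pow, Nat.shiftRight_eq_div_pow, Nat.div_div_eq_div_mul,
    pow_succ, mul_comm (2 ^ k) 2, mul_comm 2 (2 ^ k)]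

theorem ebLoop_eq (m : Nat) : ebLoop m = (List.range (PySem.Int.bitLength (m : Int))).map (pvBit m) := by
  induction m using Nat.strong_induction_on with
  | _ m ih =>
    rw [ebLoop]
    by_cases h : m = 0
    · subst h; simp
    · rw [if_neg h, PySem.Int.bitLength_natCast (Nat.pos_of_ne_zero h),
        List.range_succ_eq_map, List.map_cons,
        ih (m / 2) (Nat.div_lt_self (Nat.pos_of_ne_zero h) one_lt_two)]
      congr 1
      rw [List.map_map]
      exact List.map_congr_left (fun k _ => pvBit_succ m k)

theorem pvBitLength_le (m k : Nat) (h : m < 2 ^ k) : PySem.Int.bitLength (m : Int) ≤ k := by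
  by_contra hk
  push_neg at hk
  by_cases h0 : m = 0
  · subst h0; simp [PySem.Int.bitLength_zero] at hk
  · have h1 := PySem.Int.two_pow_bitLength_le (m : Int) (by exact_mod_cast h0)
    simp only [Int.natAbs_natCast] at h1
    have : (2 : Nat) ^ k ≤ 2 ^ (PySem.Int.bitLength (m : Int) - 1) :=
      Nat.pow_le_pow_right (by omega) (by omega)
    omega

theorem pvBit_zero (m k : Nat) (h : PySem.Int.bitLength (m : Int) ≤ k) : pvBit m k = 0 := by
  have h1 : m < 2 ^ k := by
    have h2 := PySem.Int.lt_two_pow_bitLength (m : Int)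
    simp only [Int.natAbs_natCast] at h2
    exact lt_of_lt_of_le h2 (Nat.pow_le_pow_right (by omega) h)
  unfold pvBit
  rw [Nat.shiftRight_eq_div_pow, Nat.div_eq_of_lt h1]
  simp

theorem take_pad (m P N : Nat) (hP : N ≤ PySem.Int.bitLength (m : Int) + P) :
    ((List.range (PySem.Int.bitLength (m : Int))).map (pvBit m) ++ List.replicate P (0 : Int)).take N
      = (List.range N).map (pvBit m) := by
  apply List.ext_getElem
  · simp; omega
  · intro i h1 h2
    simp only [List.length_take, List.length_append, List.length_map, List.length_range,
      List.length_replicate, lt_min_iff] at h1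
    simp only [List.getElem_take, List.getElem_map, List.getElem_range]
    rcases Nat.lt_or_ge i (PySem.Int.bitLength (m : Int)) with hi | hi
    · rw [List.getElem_append_left (by simpa using hi)]
      simp
    · rw [List.getElem_append_right (by simpa using hi)]
      rw [List.getElem_replicate, pvBit_zero m i hi]

theorem reverse_map_range (N : Nat) (f : Nat → Int) :
    ((List.range N).map f).reverse = (List.range N).map (fun k => f (N - 1 - k)) := by
  apply List.ext_getElem
  · simp
  · intro i h1 h2
    simp only [List.length_reverse, List.length_map, List.length_range] at h1
    rw [List.getElem_reverse]
    simp

theorem b_eq (m : Nat) (n : Int) :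
    (PySem.List.pyRange (n - 1) (-1) (-1)).map (fun i => PySem.Int.band ((m : Int) >>> i.toNat) 1)
      = (List.range n.toNat).map (fun k => pvBit m (n.toNat - 1 - k)) := by
  rw [PySem.List.pyRange_neg_one, List.map_map]
  have hn : (n - 1 - (-1)).toNat = n.toNat := by omega
  rw [hn]
  apply List.map_congr_left
  intro k hk
  rw [List.mem_range] at hk
  have hi : (n - 1 - (k : Int)).toNat = n.toNat - 1 - k := by omega
  simp only [Function.comp_apply]
  rw [hi, Int.shiftRight_natCast]
  rw [PySem.Int.band_one]
  unfold pvBit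
  exact_mod_cast PySem.Int.mod_natCast (m >>> (n.toNat - 1 - k)) 2

-- A's value on a negative width, as a take of the MSB list
theorem a_neg (m : Nat) (w : Int) (hw : w < 0) :
    extract_bits (m : Int) (some w)
      = (((List.range (PySem.Int.bitLength (m : Int))).map (pvBit m)).take
          (PySem.Int.bitLength (m : Int) - (-w).toNat)).reverse := by
  unfold extract_bits
  simp only [Int.toNat_natCast]
  have hwt : w.toNat = 0 := by omega
  rw [ebLoop_eq, hwt]
  simp only [List.replicate_zero, List.append_nil]
  have hk0 : 0 < (-w).toNat := by omega
  have hwk : w = -(((-w).toNat : Nat) : Int) := by omega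
  rw [hwk, PySem.List.slice_to_neg_natCast _ _ hk0]
  simp only [List.length_map, List.length_range, neg_neg, Int.toNat_natCast]

-- ===== VERDICT (by name: the statement is the Claim_ definition above) =====
theorem extract_bits_spec : Claim_unchanged_extract_bits := by
  intro x width _ hx hD
  obtain ⟨m, rfl⟩ := Int.eq_ofNat_of_zero_le hx
  match width with
  | none =>
      unfold extract_bits extract_bits_alt
      rw [b_eq]
      simp only [Int.toNat_natCast]
      rw [ebLoop_eq, reverse_map_range]
  | some w =>
      by_cases hw : 0 ≤ w
      · unfold extract_bits extract_bits_alt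
        rw [b_eq]
        simp only [Int.toNat_natCast]
        rw [ebLoop_eq, PySem.List.slice_to _ hw, take_pad m w.toNat w.toNat (by omega),
          reverse_map_range]
      · push_neg at hw
        have hlt : (m : Int) < 2 ^ (-w).toNat := by
          by_contra hge
          exact hD (by simp [D_extract_bits, hw]; omega)
        have hbl : PySem.Int.bitLength (m : Int) ≤ (-w).toNat :=
          pvBitLength_le m _ (by exact_mod_cast hlt)
        rw [a_neg m w hw]
        unfold extract_bits_alt
        rw [b_eq]
        have h0 : PySem.Int.bitLength (m : Int) - (-w).toNat = 0 := by omega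
        have hwt : w.toNat = 0 := by omega
        rw [h0, hwt]
        simp

theorem extract_bits_changed : Claim_changed_extract_bits := by
  have h13 : ebLoop 13 = [1, 0, 1, 1] := by simp [ebLoop]
  unfold Claim_changed_extract_bits
  refine ⟨by decide, by decide, by decide, ?_, by decide, by decide⟩
  show extract_bits 13 (some (-1)) = [1, 0, 1]
  simp [extract_bits, h13, PySem.List.slice_to_neg_one]

theorem extract_bits_tight : Claim_exact_extract_bits := by
  intro x width _ hx hD
  obtain ⟨m, rfl⟩ := Int.eq_ofNat_of_zero_le hx
  match width with
  | none => simp [D_extract_bits] at hD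
  | some w =>
      simp only [D_extract_bits, Option.any_some, Bool.and_eq_true, decide_eq_true_eq] at hD
      obtain ⟨hw, hge⟩ := hD
      have hk : (-w).toNat < PySem.Int.bitLength (m : Int) := by
        by_contra hc
        push_neg at hc
        have h2 := PySem.Int.lt_two_pow_bitLength (m : Int)
        simp only [Int.natAbs_natCast] at h2
        have : m < 2 ^ (-w).toNat :=
          lt_of_lt_of_le h2 (Nat.pow_le_pow_right (by omega) hc)
        have : ((m : Int)) < 2 ^ (-w).toNat := by exact_mod_cast this
        omega
      intro heq
      have hlen := congrArg List.length heq
      rw [a_neg m w hw] at hlen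
      unfold extract_bits_alt at hlen
      rw [b_eq] at hlen
      have hwt : w.toNat = 0 := by omega
      rw [hwt] at hlen
      simp at hlen
      omega
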